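-- pv_equiv track=rewrite | github.com/otaboyevsardorbek1/ai_platform | universal_project_generator.py | convert_dict_to_tree
-- ===== SOURCE A (Python) =====
-- def convert_dict_to_tree(structure: dict) -> str:
--     from collections import defaultdict
--     tree = defaultdict(list)
--     for path in structure:
--         parts = path.split("/")
--         for i in range(1, len(parts)+1):
--             tree["/".join(parts[:i-1])].append(parts[i-1])
--     def build_tree(path="", prefix=""):
--         lines = []
--         children = tree.get(path, [])
--         for i, child in enumerate(children):
--             connector = "└── " if i == len(children)-1 else "├── "
--             full_path = f"{path}/{child}" if path else child
--             if full_path in structure and structure[full_path] == "":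
--                 lines.append(f"{prefix}{connector}{child}")
--             else:
--                 lines.append(f"{prefix}{connector}{child}/")
--             if tree.get(full_path):
--                 extension = "    " if i == len(children)-1 else "│   "
--                 lines.extend(build_tree(full_path, prefix + extension))
--         return lines
--     return "\n".join(build_tree())
-- ===== SOURCE B (Python) =====
-- def convert_dict_to_tree(structure: dict) -> str:
--     from collections import defaultdict
--     tree = defaultdict(list)
--     for path in structure:
--         parts = path.split("/")
--         for i in range(1, len(parts)+1):
--             tree["/".join(parts[:i-1])].append(parts[i-1])
--     lines = []
--     stack = []
--
--     def push_children(path, prefix, kids):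
--         for i in range(len(kids) - 1, -1, -1):
--             stack.append((path, kids[i], i == len(kids) - 1, prefix))
--
--     push_children("", "", tree.get("", []))
--     while stack:
--         path, child, last, prefix = stack.pop()
--         connector = "└── " if last else "├── "
--         full_path = f"{path}/{child}" if path else child
--         if full_path in structure and structure[full_path] == "":
--             lines.append(f"{prefix}{connector}{child}")
--         else:
--             lines.append(f"{prefix}{connector}{child}/")
--         kids = tree.get(full_path)
--         if kids:
--             push_children(full_path, prefix + ("    " if last else "│   "), kids)
--     return "\n".join(lines)
-- ===== Notes on version B (the rewrite author's own statement) =====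
-- stated objective: alternative
-- what changed: The recursive build_tree renderer is replaced by an explicit-stack pre-order DFS: a while loop pops (path, child, is_last, prefix) tasks, emits the line, and pushes the node's children, accumulating lines iteratively instead of concatenating recursively returned lists; the tree-building first loop is kept verbatim.
import Mathlib
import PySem

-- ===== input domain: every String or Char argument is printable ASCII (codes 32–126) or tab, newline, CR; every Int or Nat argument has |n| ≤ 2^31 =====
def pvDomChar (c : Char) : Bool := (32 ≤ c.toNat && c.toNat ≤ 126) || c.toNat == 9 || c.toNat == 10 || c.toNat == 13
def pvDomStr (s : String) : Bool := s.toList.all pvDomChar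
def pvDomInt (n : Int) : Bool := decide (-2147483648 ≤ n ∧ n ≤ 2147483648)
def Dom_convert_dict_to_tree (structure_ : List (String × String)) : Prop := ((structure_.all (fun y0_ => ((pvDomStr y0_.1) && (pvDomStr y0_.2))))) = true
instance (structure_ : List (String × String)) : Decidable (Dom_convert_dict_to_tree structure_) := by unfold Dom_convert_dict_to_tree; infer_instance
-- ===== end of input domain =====

-- B replaces A's recursive tree renderer by an explicit-stack pre-order DFS (alternative
-- decomposition, same cost class); the first (tree-building) loop is kept verbatim.

-- ===== PORT A =====
-- shared input decoding: the Python argument is a dict[str, str]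
-- both Pythons contain verbatim the same first loop building `tree`; it is defined once here
def pvTreeOf (d : PySem.Dict String String) : PySem.Dict String (List String) :=
  d.keys.foldl (fun tr path =>
    let parts := (PySem.Str.split? path "/").getD []   -- sep "/" ≠ "": never the default
    (PySem.List.pyRange 1 ((parts.length : Int) + 1) 1).foldl (fun tr i =>
      tr.modify (PySem.Str.join "/" (PySem.List.slice parts none (some (i - 1)))) []
        (fun l => l ++ [PySem.List.pyGetD parts (i - 1) ""])) tr)
    PySem.Dict.empty

-- fuel bound (totality device only: Python A's recursion depth on any input the claim
-- covers is at most the total number of stored parts + 1, see Pre_ below)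
def pvFuelOf (tree : PySem.Dict String (List String)) : Nat :=
  (tree.values.map List.length).sum + 2

mutual
-- the `for i, child in enumerate(children)` loop body of build_tree
def pvGoA (d : PySem.Dict String String) (tree : PySem.Dict String (List String)) :
    Nat → String → String → List (Int × String) → Int → List String
  | _, _, _, [], _ => []
  | f, path, pref, (i, child) :: rest, n =>
      let connector := if i == n - 1 then "└── " else "├── "
      let full := if path == "" then child else path ++ "/" ++ child
      let line := if d.get? full == some "" then pref ++ connector ++ child
                  else pref ++ connector ++ child ++ "/"
      line :: (pvExtA d tree f full pref (i == n - 1) ++ pvGoA d tree f path pref rest n)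
termination_by f _ _ l _ => (f, l.length + 2)

-- the `if tree.get(full_path): extension = ...; lines.extend(build_tree(...))` step
def pvExtA (d : PySem.Dict String String) (tree : PySem.Dict String (List String))
    (f : Nat) (full pref : String) (lastc : Bool) : List String :=
  match tree.get? full with
  | some (_ :: _) => pvBuildA d tree f full (pref ++ (if lastc then "    " else "│   "))
  | _ => []
termination_by (f, 1)

-- build_tree(path, pref), with fuel
def pvBuildA (d : PySem.Dict String String) (tree : PySem.Dict String (List String)) :
    Nat → String → String → List String
  | 0, _, _ => []
  | Nat.succ f, path, pref =>
      let children := (tree.get? path).getD []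
      pvGoA d tree f path pref (PySem.List.enumerate children 0) (children.length : Int)
termination_by f _ _ => (f, 0)
end

def convert_dict_to_tree (structure_ : List (String × String)) : String :=
  let d := PySem.Dict.ofList structure_
  let tree := pvTreeOf d
  PySem.Str.join "\n" (pvBuildA d tree (pvFuelOf tree) "" "")

-- ===== PORT B =====
-- a stack task is (fuel, path, child, last, pref); push_children builds the tasks for
-- one node's children (the Lean list-stack keeps them in order instead of reversed pushes)
def pvKidTasks (f : Nat) (path pref : String) (kids : List String) :
    List (Nat × String × String × Bool × String) :=
  (PySem.List.enumerate kids 0).map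
    (fun p => (f, path, p.2, p.1 == (kids.length : Int) - 1, pref))

-- any one children list is no longer than the total number of stored parts
theorem pv_kids_le (tree : PySem.Dict String (List String)) (k : String) (v : List String)
    (h : tree.get? k = some v) : v.length ≤ (tree.values.map List.length).sum := by
  have hmem : (k, v) ∈ tree.items := PySem.Dict.mem_items_of_get?_eq_some tree h
  have hv : v ∈ tree.values := by
    have := List.mem_map_of_mem (f := fun p => p.2) hmem
    simpa [PySem.Dict.values] using this
  exact List.single_le_sum (by simp) _ (List.mem_map_of_mem hv)

-- measure of the tasks pushed for one node (used only for termination of pvLoopB)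
theorem pv_sum_kidtasks (f' : Nat) (p q : String) (kids : List String) (c : Nat) :
    ((pvKidTasks f' p q kids).map (fun t => c ^ t.1)).sum = kids.length * c ^ f' := by
  simp [pvKidTasks, List.map_map, Function.comp_def, PySem.List.length_enumerate, Nat.mul_comm]

-- the `kids = tree.get(full_path); if kids: push_children(...)` step of the while loop
def pvSubTasks (tree : PySem.Dict String (List String)) (f : Nat) (full pref : String)
    (last : Bool) : List (Nat × String × String × Bool × String) :=
  match f, tree.get? full with
  | Nat.succ f', some (k :: ks) =>
      pvKidTasks f' full (pref ++ (if last then "    " else "│   ")) (k :: ks)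
  | _, _ => []

-- the pushed tasks weigh less than the popped one (termination of pvLoopB)
theorem pv_subtasks_measure (tree : PySem.Dict String (List String)) (f : Nat)
    (full pref : String) (last : Bool) :
    ((pvSubTasks tree f full pref last).map
        (fun t => ((tree.values.map List.length).sum + 2) ^ t.1)).sum
      < ((tree.values.map List.length).sum + 2) ^ f := by
  unfold pvSubTasks
  split
  · rename_i f' k ks heq
    have hle : (k :: ks).length ≤ (tree.values.map List.length).sum := pv_kids_le tree _ _ heq
    rw [pv_sum_kidtasks, pow_succ]
    have hp : 0 < ((tree.values.map List.length).sum + 2) ^ f' := Nat.pow_pos (by omega)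
    have h3 : (k :: ks).length * ((tree.values.map List.length).sum + 2) ^ f'
        < (((tree.values.map List.length).sum + 2) ^ f') * ((tree.values.map List.length).sum + 2) := by
      rw [Nat.mul_comm (((tree.values.map List.length).sum + 2) ^ f')]
      exact Nat.mul_lt_mul_of_pos_right (by omega) hp
    omega
  · simp only [List.map_nil, List.sum_nil]
    exact Nat.pow_pos (by omega)

-- the `while stack:` loop; per-task fuel is the totality device
def pvLoopB (d : PySem.Dict String String) (tree : PySem.Dict String (List String)) :
    List (Nat × String × String × Bool × String) → List String
  | [] => []
  | (f, path, child, last, pref) :: rest =>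
      let connector := if last then "└── " else "├── "
      let full := if path == "" then child else path ++ "/" ++ child
      let line := if d.get? full == some "" then pref ++ connector ++ child
                  else pref ++ connector ++ child ++ "/"
      line :: pvLoopB d tree (pvSubTasks tree f full pref last ++ rest)
termination_by stack =>
  (stack.map (fun t => ((tree.values.map List.length).sum + 2) ^ t.1)).sum
decreasing_by
  simp only [List.map_append, List.sum_append, List.map_cons, List.sum_cons]
  exact Nat.add_lt_add_right (pv_subtasks_measure _ _ _ _ _) _

def convert_dict_to_tree_alt (structure_ : List (String × String)) : String :=
  let d := PySem.Dict.ofList structure_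
  let tree := pvTreeOf d
  PySem.Str.join "\n"
    (pvLoopB d tree (pvKidTasks (pvFuelOf tree - 1) "" "" ((tree.get? "").getD [])))

-- ===== PRECONDITION & SPEC =====
-- Pre_ excludes exactly the inputs on which Python A never returns: a key "" or a key
-- starting with "/" puts "" among the root's children, and build_tree then recurses on
-- the root path "" forever (RecursionError).
def Pre_convert_dict_to_tree (structure_ : List (String × String)) : Prop :=
  (structure_.all (fun p => !(p.1 == "") && !(PySem.Str.startswith p.1 "/"))) = true
instance (structure_ : List (String × String)) : Decidable (Pre_convert_dict_to_tree structure_) := by unfold Pre_convert_dict_to_tree; infer_instance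

def pvWitness_convert_dict_to_tree : (List (String × String)) :=
  [("src/main.py", ""), ("src/util.py", ""), ("README.md", "docs")]

def Spec_convert_dict_to_tree (structure_ : List (String × String)) (out : String) : Prop := out = convert_dict_to_tree_alt structure_
instance (structure_ : List (String × String)) (out : String) : Decidable (Spec_convert_dict_to_tree structure_ out) := by unfold Spec_convert_dict_to_tree; infer_instance

-- ===== CLAIM (what is proved, stated in full; the proofs are below) =====
def Claim_equal_convert_dict_to_tree : Prop := ∀ (structure_ : List (String × String)), Dom_convert_dict_to_tree structure_ → Pre_convert_dict_to_tree structure_ → Spec_convert_dict_to_tree structure_ (convert_dict_to_tree structure_)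

-- ===== LEMMAS AND PROOFS =====

-- what one stack task contributes to the output: its own line, then its whole subtree
def pvTaskOut (d : PySem.Dict String String) (tree : PySem.Dict String (List String))
    (t : Nat × String × String × Bool × String) : List String :=
  match t with
  | (f, path, child, last, pref) =>
      let connector := if last then "└── " else "├── "
      let full := if path == "" then child else path ++ "/" ++ child
      let line := if d.get? full == some "" then pref ++ connector ++ child
                  else pref ++ connector ++ child ++ "/"
      line :: pvExtA d tree f full pref last

-- the enumerate loop of build_tree emits, child by child, exactly the task outputs
theorem pv_goA_eq (d : PySem.Dict String String) (tree : PySem.Dict String (List String))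
    (f : Nat) (path pref : String) (n : Int) (es : List (Int × String)) :
    pvGoA d tree f path pref es n =
      (es.map (fun p => pvTaskOut d tree (f, path, p.2, p.1 == n - 1, pref))).flatten := by
  induction es with
  | nil => simp [pvGoA]
  | cons e rest ih =>
      obtain ⟨i, child⟩ := e
      rw [pvGoA, ih]
      simp [pvTaskOut]

-- one build_tree call is exactly the flattened outputs of its children's tasks
theorem pv_buildA_eq (d : PySem.Dict String String) (tree : PySem.Dict String (List String))
    (f : Nat) (path pref : String) :
    pvBuildA d tree (f + 1) path pref =
      ((pvKidTasks f path pref ((tree.get? path).getD [])).map (pvTaskOut d tree)).flatten := by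
  simp only [pvBuildA]
  rw [pv_goA_eq]
  simp [pvKidTasks, List.map_map, Function.comp_def]

-- what pvLoopB pushes for one node flattens to that node's subtree lines
theorem pv_subtasks_out (d : PySem.Dict String String) (tree : PySem.Dict String (List String))
    (f : Nat) (full pref : String) (last : Bool) :
    ((pvSubTasks tree f full pref last).map (pvTaskOut d tree)).flatten =
      pvExtA d tree f full pref last := by
  unfold pvSubTasks pvExtA
  cases f with
  | zero =>
      cases hc : tree.get? full with
      | none => simp
      | some l => cases l <;> simp [pvBuildA]
  | succ f' =>
      cases hc : tree.get? full with
      | none => simp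
      | some l =>
          cases l with
          | nil => simp
          | cons k ks => rw [pv_buildA_eq]; simp [hc]

-- the stack loop emits the flattened outputs of all pending tasks
theorem pv_loopB_eq (d : PySem.Dict String String) (tree : PySem.Dict String (List String))
    (stack : List (Nat × String × String × Bool × String)) :
    pvLoopB d tree stack = (stack.map (pvTaskOut d tree)).flatten := by
  induction stack using pvLoopB.induct d tree with
  | case1 => simp [pvLoopB]
  | case2 f path child last pref rest full ih =>
      have ih' : pvLoopB d tree
            (pvSubTasks tree f (if path == "" then child else path ++ "/" ++ child) pref last ++ rest)
          = ((pvSubTasks tree f (if path == "" then child else path ++ "/" ++ child) pref last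
              ++ rest).map (pvTaskOut d tree)).flatten := ih
      rw [pvLoopB, ih']
      simp only [List.map_cons, List.flatten_cons, List.map_append, List.flatten_append]
      rw [pv_subtasks_out]
      rfl

-- ===== VERDICT (by name: the statement is the Claim_ definition above) =====
theorem convert_dict_to_tree_spec : Claim_equal_convert_dict_to_tree := by
  intro st hd hp
  show PySem.Str.join "\n"
      (pvBuildA (PySem.Dict.ofList st) (pvTreeOf (PySem.Dict.ofList st))
        (pvFuelOf (pvTreeOf (PySem.Dict.ofList st))) "" "")
    = PySem.Str.join "\n"
      (pvLoopB (PySem.Dict.ofList st) (pvTreeOf (PySem.Dict.ofList st))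
        (pvKidTasks (pvFuelOf (pvTreeOf (PySem.Dict.ofList st)) - 1) "" ""
          (((pvTreeOf (PySem.Dict.ofList st)).get? "").getD [])))
  rw [pv_loopB_eq]
  congr 1
  have hf : pvFuelOf (pvTreeOf (PySem.Dict.ofList st))
      = (((pvTreeOf (PySem.Dict.ofList st)).values.map List.length).sum + 1) + 1 := rfl
  have hf1 : pvFuelOf (pvTreeOf (PySem.Dict.ofList st)) - 1
      = ((pvTreeOf (PySem.Dict.ofList st)).values.map List.length).sum + 1 := rfl
  rw [hf]
  simp only [Nat.add_sub_cancel]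
  rw [pv_buildA_eq]
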